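-- pv_equiv track=rewrite | github.com/pypi-data/pypi-mirror-373 | packages/vision-agent-framework/vision_agent_framework-1.0.0-py3-none-any.whl/vision_agent/core/canvas_interface.py | _extract_parameters_from_query
-- ===== SOURCE A (Python) =====
-- from typing import Dict, List, Tuple, Optional, Any, Set
--
-- def _extract_parameters_from_query(user_query: str) -> Dict[str, Any]:
--     """Extract parameters from user query."""
--     parameters = {}
--
--     # Look for file references
--     if 'image' in user_query.lower():
--         parameters['image_type'] = 'user_provided'
--     if 'video' in user_query.lower():
--         parameters['video_type'] = 'user_provided'
--
--     # Look for quality/performance preferences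
--     if any(term in user_query.lower() for term in ['fast', 'quick', 'speed']):
--         parameters['performance_mode'] = 'fast'
--     elif any(term in user_query.lower() for term in ['accurate', 'precise', 'detailed']):
--         parameters['performance_mode'] = 'accurate'
--
--     # Look for output preferences
--     if any(term in user_query.lower() for term in ['json', 'structured']):
--         parameters['output_format'] = 'json'
--     elif any(term in user_query.lower() for term in ['summary', 'brief']):
--         parameters['output_format'] = 'summary'
--
--     return parameters
-- ===== SOURCE B (Python) =====
-- _TERMS = ('image', 'video', 'fast', 'quick', 'speed', 'accurate', 'precise',
--           'detailed', 'json', 'structured', 'summary', 'brief')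
--
-- def _extract_parameters_from_query(user_query):
--     """Extract parameters from user query.
--
--     One scan over the lowered query: at each position collect every keyword
--     that starts there into a hit set, then assemble the parameters from it.
--     """
--     q = user_query.lower()
--     hits = set()
--     for i in range(len(q)):
--         for t in _TERMS:
--             if q.startswith(t, i):
--                 hits.add(t)
--     parameters = {}
--     if 'image' in hits:
--         parameters['image_type'] = 'user_provided'
--     if 'video' in hits:
--         parameters['video_type'] = 'user_provided'
--     if 'fast' in hits or 'quick' in hits or 'speed' in hits:
--         parameters['performance_mode'] = 'fast'
--     elif 'accurate' in hits or 'precise' in hits or 'detailed' in hits: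
--         parameters['performance_mode'] = 'accurate'
--     if 'json' in hits or 'structured' in hits:
--         parameters['output_format'] = 'json'
--     elif 'summary' in hits or 'brief' in hits:
--         parameters['output_format'] = 'summary'
--     return parameters
-- ===== Notes on version B (the rewrite author's own statement) =====
-- stated objective: alternative
-- what changed: Instead of ten independent substring-membership tests, B lowercases once and makes a single left-to-right scan of the query, collecting at each position the set of keywords that start there (hand-rolled multi-pattern matching), then assembles the parameter dict from that hit set.
import Mathlib
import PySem

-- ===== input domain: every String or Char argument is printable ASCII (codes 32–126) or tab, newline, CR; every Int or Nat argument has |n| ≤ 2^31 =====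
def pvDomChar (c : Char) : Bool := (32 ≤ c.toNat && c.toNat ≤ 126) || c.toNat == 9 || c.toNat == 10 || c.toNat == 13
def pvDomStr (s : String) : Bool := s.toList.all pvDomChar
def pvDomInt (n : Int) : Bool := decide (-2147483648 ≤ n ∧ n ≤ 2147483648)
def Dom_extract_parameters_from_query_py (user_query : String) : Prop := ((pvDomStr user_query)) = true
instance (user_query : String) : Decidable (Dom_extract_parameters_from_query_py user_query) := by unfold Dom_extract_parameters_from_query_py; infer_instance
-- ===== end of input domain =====

-- B replaces A's ten independent substring-membership tests by one left-to-right scan of the lowered query that collects the set of keywords starting at each position, then assembles the dict from that hit set (alternative algorithm, similar cost).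


-- ===== PORT A =====
def extract_parameters_from_query_py (user_query : String) : List (String × String) :=
  let parameters : PySem.Dict String String := PySem.Dict.empty
  let parameters := if PySem.Str.isIn "image" (PySem.Str.lower user_query) then parameters.insert "image_type" "user_provided" else parameters
  let parameters := if PySem.Str.isIn "video" (PySem.Str.lower user_query) then parameters.insert "video_type" "user_provided" else parameters
  let parameters :=
    if ["fast", "quick", "speed"].any (fun t => PySem.Str.isIn t (PySem.Str.lower user_query)) then parameters.insert "performance_mode" "fast"
    else if ["accurate", "precise", "detailed"].any (fun t => PySem.Str.isIn t (PySem.Str.lower user_query)) then parameters.insert "performance_mode" "accurate"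
    else parameters
  let parameters :=
    if ["json", "structured"].any (fun t => PySem.Str.isIn t (PySem.Str.lower user_query)) then parameters.insert "output_format" "json"
    else if ["summary", "brief"].any (fun t => PySem.Str.isIn t (PySem.Str.lower user_query)) then parameters.insert "output_format" "summary"
    else parameters
  parameters.items

-- ===== PORT B =====
def pvTerms : List String :=
  ["image", "video", "fast", "quick", "speed", "accurate", "precise",
   "detailed", "json", "structured", "summary", "brief"]

-- the scan: for each position i of q, add every term that starts at i to the hit set
def pvScanHits (q : List Char) : PySem.Set String :=
  (List.range q.length).foldl
    (fun hits i => pvTerms.foldl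
      (fun hits t => if PySem.Chars.startswith (q.drop i) t.toList then PySem.Set.add hits t else hits)
      hits)
    PySem.Set.empty

def extract_parameters_from_query_py_alt (user_query : String) : List (String × String) :=
  let q := (PySem.Str.lower user_query).toList
  let hits := pvScanHits q
  let parameters : PySem.Dict String String := PySem.Dict.empty
  let parameters := if PySem.Set.contains hits "image" then parameters.insert "image_type" "user_provided" else parameters
  let parameters := if PySem.Set.contains hits "video" then parameters.insert "video_type" "user_provided" else parameters
  let parameters :=
    if PySem.Set.contains hits "fast" || PySem.Set.contains hits "quick" || PySem.Set.contains hits "speed" then parameters.insert "performance_mode" "fast"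
    else if PySem.Set.contains hits "accurate" || PySem.Set.contains hits "precise" || PySem.Set.contains hits "detailed" then parameters.insert "performance_mode" "accurate"
    else parameters
  let parameters :=
    if PySem.Set.contains hits "json" || PySem.Set.contains hits "structured" then parameters.insert "output_format" "json"
    else if PySem.Set.contains hits "summary" || PySem.Set.contains hits "brief" then parameters.insert "output_format" "summary"
    else parameters
  parameters.items

-- ===== PRECONDITION & SPEC =====
def Spec_extract_parameters_from_query_py (user_query : String) (out : List (String × String)) : Prop := out = extract_parameters_from_query_py_alt user_query
instance (user_query : String) (out : List (String × String)) : Decidable (Spec_extract_parameters_from_query_py user_query out) := by unfold Spec_extract_parameters_from_query_py; infer_instance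

-- ===== CLAIM =====
def Claim_equal_extract_parameters_from_query_py : Prop := ∀ (user_query : String), Dom_extract_parameters_from_query_py user_query → Spec_extract_parameters_from_query_py user_query (extract_parameters_from_query_py user_query)

-- ===== LEMMAS AND PROOFS =====

-- inner loop of the scan: what ends up in the set after folding the term table at one position
lemma mem_inner_foldl (ts : List String) (q : List Char) (i : Nat) (s : PySem.Set String) (t : String) :
    t ∈ ts.foldl (fun hits u => if PySem.Chars.startswith (q.drop i) u.toList then PySem.Set.add hits u else hits) s ↔
      t ∈ s ∨ (t ∈ ts ∧ PySem.Chars.startswith (q.drop i) t.toList = true) := by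
  induction ts generalizing s with
  | nil => simp
  | cons u us ih =>
    simp only [List.foldl_cons, ih, List.mem_cons]
    split_ifs with h
    · simp only [PySem.Set.mem_add]
      constructor
      · rintro ((hs | rfl) | h2)
        · exact Or.inl hs
        · exact Or.inr ⟨Or.inl rfl, h⟩
        · exact Or.inr ⟨Or.inr h2.1, h2.2⟩
      · rintro (hs | ⟨(rfl | hm), hsw⟩)
        · exact Or.inl (Or.inl hs)
        · exact Or.inl (Or.inr rfl)
        · exact Or.inr ⟨hm, hsw⟩
    · constructor
      · rintro (hs | h2)
        · exact Or.inl hs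
        · exact Or.inr ⟨Or.inr h2.1, h2.2⟩
      · rintro (hs | ⟨(rfl | hm), hsw⟩)
        · exact Or.inl hs
        · exact absurd hsw (by simpa using h)
        · exact Or.inr ⟨hm, hsw⟩

-- outer loop: membership in the scanned hit set
lemma mem_scanHits (q : List Char) (t : String) :
    t ∈ pvScanHits q ↔ t ∈ pvTerms ∧ ∃ i < q.length, PySem.Chars.startswith (q.drop i) t.toList = true := by
  unfold pvScanHits
  have h : ∀ (ps : List Nat) (s : PySem.Set String),
      t ∈ ps.foldl (fun hits i => pvTerms.foldl
        (fun hits u => if PySem.Chars.startswith (q.drop i) u.toList then PySem.Set.add hits u else hits) hits) s ↔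
        t ∈ s ∨ (t ∈ pvTerms ∧ ∃ i ∈ ps, PySem.Chars.startswith (q.drop i) t.toList = true) := by
    intro ps
    induction ps with
    | nil => simp
    | cons p ps ih =>
      intro s
      simp only [List.foldl_cons, ih, mem_inner_foldl, List.mem_cons]
      constructor
      · rintro ((hs | ⟨hm, hsw⟩) | ⟨hm, i, hi, hsw⟩)
        · exact Or.inl hs
        · exact Or.inr ⟨hm, p, Or.inl rfl, hsw⟩
        · exact Or.inr ⟨hm, i, Or.inr hi, hsw⟩
      · rintro (hs | ⟨hm, i, (rfl | hi), hsw⟩)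
        · exact Or.inl (Or.inl hs)
        · exact Or.inl (Or.inr ⟨hm, hsw⟩)
        · exact Or.inr ⟨hm, i, hi, hsw⟩
  rw [h]
  simp [PySem.Set.empty, List.mem_range]

-- for a nonempty term of the table, the scan finds it exactly when Python's 'in' does
lemma contains_scanHits_eq (uq : String) (t : String) (hm : t ∈ pvTerms) (hne : t.toList ≠ []) :
    PySem.Set.contains (pvScanHits (PySem.Str.lower uq).toList) t = PySem.Str.isIn t (PySem.Str.lower uq) := by
  set q := (PySem.Str.lower uq).toList with hq
  rw [Bool.eq_iff_iff, PySem.Set.contains_iff, mem_scanHits, PySem.Str.isIn_iff_infix, ← hq,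
    ← PySem.Chars.isIn_iff_infix, ← PySem.Chars.exists_prefix_drop_iff_isIn]
  constructor
  · rintro ⟨-, i, -, hsw⟩
    exact ⟨i, (PySem.Chars.startswith_iff _ _).1 hsw⟩
  · rintro ⟨j, hpre⟩
    refine ⟨hm, j, ?_, (PySem.Chars.startswith_iff _ _).2 hpre⟩
    by_contra hj
    rw [Nat.not_lt] at hj
    have : q.drop j = [] := List.drop_eq_nil_of_le hj
    rw [this] at hpre
    exact hne (List.prefix_nil.mp hpre)

-- ===== VERDICT =====
theorem extract_parameters_from_query_py_spec : Claim_equal_extract_parameters_from_query_py := by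
  intro uq _
  unfold Spec_extract_parameters_from_query_py
  simp only [extract_parameters_from_query_py, extract_parameters_from_query_py_alt,
    contains_scanHits_eq uq "image" (by decide) (by decide),
    contains_scanHits_eq uq "video" (by decide) (by decide),
    contains_scanHits_eq uq "fast" (by decide) (by decide),
    contains_scanHits_eq uq "quick" (by decide) (by decide),
    contains_scanHits_eq uq "speed" (by decide) (by decide),
    contains_scanHits_eq uq "accurate" (by decide) (by decide),
    contains_scanHits_eq uq "precise" (by decide) (by decide),
    contains_scanHits_eq uq "detailed" (by decide) (by decide),
    contains_scanHits_eq uq "json" (by decide) (by decide),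
    contains_scanHits_eq uq "structured" (by decide) (by decide),
    contains_scanHits_eq uq "summary" (by decide) (by decide),
    contains_scanHits_eq uq "brief" (by decide) (by decide),
    List.any_cons, List.any_nil, Bool.or_false, Bool.or_assoc]
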